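-- pv_equiv track=rewrite | github.com/Pakspunch/dsa-practice | data_structure/arrays/day7_fruits_in_a_basket.py | total_fruits
-- ===== SOURCE A (Python) =====
-- from collections import defaultdict
--
-- def total_fruits(fruits):
--
--     count = defaultdict(int)
--     left = 0
--     max_length = 0
--
--     start = 0
--
--     for right in range(len(fruits)):
--         count[fruits[right]] += 1
--
--         while len(count) > 2:
--             count[fruits[left]] -= 1
--
--             if count[fruits[left]] == 0:
--                 del count[fruits[left]]
--
--             left += 1
--
--         curr_length = right - left  + 1
--         #max_length = max(max_length, curr_length)
--
--         if curr_length > max_length: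
--             max_length = curr_length
--             start = left
--
--     return max_length, fruits[start : start + max_length]
-- ===== SOURCE B (Python) =====
-- def total_fruits(fruits):
--     last_index = {}
--     left = 0
--     max_length = 0
--     start = 0
--     for right in range(len(fruits)):
--         last_index[fruits[right]] = right
--         if len(last_index) > 2:
--             evict = min(last_index, key=last_index.get)
--             left = last_index[evict] + 1
--             del last_index[evict]
--         curr_length = right - left + 1
--         if curr_length > max_length:
--             max_length = curr_length
--             start = left
--     return max_length, fruits[start : start + max_length]
-- ===== Notes on version B (the rewrite author's own statement) =====
-- stated objective: alternative
-- what changed: B replaces A's per-fruit counter dict and element-by-element shrink loop by a last-seen-index dict: when a third distinct fruit appears, the window's left edge jumps directly past the minimal last-seen index and that one key is deleted, so there is no inner decrement loop.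
import Mathlib
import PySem

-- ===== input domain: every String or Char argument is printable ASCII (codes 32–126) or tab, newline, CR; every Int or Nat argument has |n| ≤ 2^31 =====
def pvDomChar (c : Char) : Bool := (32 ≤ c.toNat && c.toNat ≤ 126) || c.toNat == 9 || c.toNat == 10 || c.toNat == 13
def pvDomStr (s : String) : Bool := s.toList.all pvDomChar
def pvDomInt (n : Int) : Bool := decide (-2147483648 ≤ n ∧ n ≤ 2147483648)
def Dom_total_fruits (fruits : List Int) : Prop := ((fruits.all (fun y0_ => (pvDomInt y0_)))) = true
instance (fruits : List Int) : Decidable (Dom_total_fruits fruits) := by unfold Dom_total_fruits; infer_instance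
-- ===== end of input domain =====

-- B replaces A's counter dict + element-by-element window-shrink loop by a last-seen-index
-- dict whose left edge jumps past the minimal last-seen index in one step (objective: alternative).


-- ===== PORT A =====
-- the 'while len(count) > 2' shrink loop; fuel only makes the recursion structural (the loop
-- pops at most one window slot per iteration, so fuel = fruits.length is never exhausted)
def popA (fruits : List Int) : Nat → PySem.Dict Int Int → Int → PySem.Dict Int Int × Int
  | 0, cnt, left => (cnt, left)
  | fuel+1, cnt, left =>
    if 2 < cnt.size then
      -- fruits[left]: in range whenever Python's loop reaches it (left ≤ right < len)
      let x := PySem.List.pyGetD fruits left 0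
      let cnt1 := cnt.modify x 0 (· - 1)
      let cnt2 := if cnt1.getD x 0 = 0 then cnt1.erase x else cnt1
      popA fruits fuel cnt2 (left + 1)
    else (cnt, left)

-- one iteration of A's 'for right in range(len(fruits))' body; state = (count, left, max_length, start)
def stepA (fruits : List Int) (s : PySem.Dict Int Int × Int × Int × Int) (right : Int) :
    PySem.Dict Int Int × Int × Int × Int :=
  let cnt := s.1.modify (PySem.List.pyGetD fruits right 0) 0 (· + 1)
  let cl := popA fruits fruits.length cnt s.2.1
  let curr := right - cl.2 + 1
  if s.2.2.1 < curr then (cl.1, cl.2, curr, cl.2) else (cl.1, cl.2, s.2.2.1, s.2.2.2)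

def total_fruits (fruits : List Int) : Int × List Int :=
  let final := (PySem.List.pyRange 0 (PySem.List.len fruits) 1).foldl (stepA fruits)
    ((PySem.Dict.empty, 0, 0, 0) : PySem.Dict Int Int × Int × Int × Int)
  (final.2.2.1, PySem.List.slice fruits (some final.2.2.2) (some (final.2.2.2 + final.2.2.1)))

-- ===== PORT B =====
-- one iteration of B's loop body; state = (last_index, left, max_length, start)
def stepB (fruits : List Int) (s : PySem.Dict Int Int × Int × Int × Int) (right : Int) :
    PySem.Dict Int Int × Int × Int × Int :=
  let last := s.1.insert (PySem.List.pyGetD fruits right 0) right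
  let ll :=
    if 2 < last.size then
      match PySem.List.min? last.keys (fun k => last.getD k 0) with
      | some evict => (last.erase evict, last.getD evict 0 + 1)
      | none => (last, s.2.1)   -- unreachable: a dict of size > 2 has a key
    else (last, s.2.1)
  let curr := right - ll.2 + 1
  if s.2.2.1 < curr then (ll.1, ll.2, curr, ll.2) else (ll.1, ll.2, s.2.2.1, s.2.2.2)

def total_fruits_alt (fruits : List Int) : Int × List Int :=
  let final := (PySem.List.pyRange 0 (PySem.List.len fruits) 1).foldl (stepB fruits)
    ((PySem.Dict.empty, 0, 0, 0) : PySem.Dict Int Int × Int × Int × Int)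
  (final.2.2.1, PySem.List.slice fruits (some final.2.2.2) (some (final.2.2.2 + final.2.2.1)))

-- ===== PRECONDITION & SPEC =====
def Spec_total_fruits (fruits : List Int) (out : Int × List Int) : Prop := out = total_fruits_alt fruits
instance (fruits : List Int) (out : Int × List Int) : Decidable (Spec_total_fruits fruits out) := by unfold Spec_total_fruits; infer_instance

-- ===== CLAIM (what is proved, stated in full; the proofs are below) =====
def Claim_equal_total_fruits : Prop := ∀ (fruits : List Int), Dom_total_fruits fruits → Spec_total_fruits fruits (total_fruits fruits)

-- ===== LEMMAS AND PROOFS =====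

-- the current window fruits[l:i]
def win (fruits : List Int) (l i : Nat) : List Int := (fruits.take i).drop l

-- number of distinct values in a list
def dc (w : List Int) : Nat := (PySem.Set.ofList w).length

-- A's counter dict represents the multiset of the window
def InvCnt (fruits : List Int) (cnt : PySem.Dict Int Int) (l i : Nat) : Prop :=
  cnt.keys.Nodup ∧
  (∀ v : Int, cnt.getD v 0 = ((win fruits l i).count v : Int)) ∧
  (∀ v : Int, v ∈ cnt.keys ↔ v ∈ win fruits l i)

-- B's dict maps each value of the window to its last occurrence index below i (which is ≥ l)
def InvLast (fruits : List Int) (last : PySem.Dict Int Int) (l i : Nat) : Prop :=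
  last.keys.Nodup ∧
  ∀ (v j : Int), last.get? v = some j ↔
    ∃ jn : Nat, j = (jn : Int) ∧ l ≤ jn ∧ jn < i ∧ fruits[jn]? = some v ∧
      (∀ k : Nat, jn < k → k < i → fruits[k]? ≠ some v)

theorem win_mem_iff (fruits : List Int) (l i : Nat) (hi : i ≤ fruits.length) (v : Int) :
    v ∈ win fruits l i ↔ ∃ j : Nat, l ≤ j ∧ j < i ∧ fruits[j]? = some v := by
  unfold win
  constructor
  · intro h
    obtain ⟨k, hk, hkv⟩ := List.mem_iff_getElem.mp h
    simp only [List.length_drop, List.length_take] at hk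
    refine ⟨l + k, by omega, by omega, ?_⟩
    rw [List.getElem_drop, List.getElem_take] at hkv
    rw [List.getElem?_eq_getElem (by omega)]
    exact congrArg some hkv
  · rintro ⟨j, h1, h2, h3⟩
    have hjlen : j < fruits.length := by
      by_contra hc
      rw [List.getElem?_eq_none (by omega)] at h3
      simp at h3
    have hv : fruits[j] = v := by
      rw [List.getElem?_eq_getElem hjlen] at h3
      exact Option.some.inj h3
    refine List.mem_iff_getElem.mpr ⟨j - l, ?_, ?_⟩
    · simp only [List.length_drop, List.length_take]; omega
    · rw [List.getElem_drop, List.getElem_take]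
      have : l + (j - l) = j := by omega
      simp only [this]
      exact hv

theorem win_cons (fruits : List Int) (l i : Nat) (hl : l < i) (hi : i ≤ fruits.length) :
    win fruits l i = fruits[l]'(by omega) :: win fruits (l+1) i := by
  unfold win
  rw [List.drop_eq_getElem_cons (by simp only [List.length_take]; omega)]
  rw [List.getElem_take]

theorem win_length (fruits : List Int) (l i : Nat) (hl : l ≤ i) (hi : i ≤ fruits.length) :
    (win fruits l i).length = i - l := by
  unfold win
  simp only [List.length_drop, List.length_take]
  omega

theorem dc_le_two_of_subset (w : List Int) (t : List Int) (_ht : t.Nodup)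
    (h : ∀ v ∈ w, v ∈ t) (hlen : t.length ≤ 2) : dc w ≤ 2 := by
  unfold dc
  have hsub : (PySem.Set.ofList w).toFinset ⊆ t.toFinset := by
    intro v hv
    simp only [List.mem_toFinset] at hv ⊢
    exact h v ((PySem.Set.mem_ofList w v).mp hv)
  have := Finset.card_le_card hsub
  rw [List.toFinset_card_of_nodup (PySem.Set.nodup_ofList w)] at this
  calc (PySem.Set.ofList w).length ≤ t.toFinset.card := this
    _ ≤ t.length := List.toFinset_card_le t
    _ ≤ 2 := hlen

theorem three_le_dc (w : List Int) (t : List Int) (ht : t.Nodup) (hlen : 3 ≤ t.length)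
    (h : ∀ v ∈ t, v ∈ w) : 3 ≤ dc w := by
  unfold dc
  have hsub : t.toFinset ⊆ (PySem.Set.ofList w).toFinset := by
    intro v hv
    simp only [List.mem_toFinset] at hv ⊢
    exact (PySem.Set.mem_ofList w v).mpr (h v hv)
  have := Finset.card_le_card hsub
  rw [List.toFinset_card_of_nodup ht, List.toFinset_card_of_nodup (PySem.Set.nodup_ofList w)] at this
  omega

theorem dc_le_length (w : List Int) : dc w ≤ w.length := by
  exact PySem.Set.length_ofList_le w

theorem size_of_InvCnt (fruits : List Int) (cnt : PySem.Dict Int Int) (l i : Nat)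
    (h : InvCnt fruits cnt l i) : cnt.size = dc (win fruits l i) := by
  obtain ⟨hnd, -, hmem⟩ := h
  have hperm : cnt.keys.Perm (PySem.Set.ofList (win fruits l i)) := by
    rw [List.perm_ext_iff_of_nodup hnd (PySem.Set.nodup_ofList _)]
    intro v
    rw [hmem v, PySem.Set.mem_ofList _ v]
  have hlen := hperm.length_eq
  have hsz : cnt.size = cnt.keys.length := by
    simp [PySem.Dict.size, PySem.Dict.keys]
  rw [hsz, hlen]; rfl

-- last occurrences: existence and uniqueness
theorem lastOcc_exists (fruits : List Int) (l i : Nat) (v : Int) (hi : i ≤ fruits.length)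
    (hv : v ∈ win fruits l i) :
    ∃ jn : Nat, l ≤ jn ∧ jn < i ∧ fruits[jn]? = some v ∧
      (∀ k : Nat, jn < k → k < i → fruits[k]? ≠ some v) := by
  obtain ⟨j, hj1, hj2, hj3⟩ := (win_mem_iff fruits l i hi v).mp hv
  classical
  set P : Nat → Prop := fun k => l ≤ k ∧ k < i ∧ fruits[k]? = some v with hP
  have hPj : P j := ⟨hj1, hj2, hj3⟩
  have hspec : P (Nat.findGreatest P i) := Nat.findGreatest_spec (by omega) hPj
  refine ⟨Nat.findGreatest P i, hspec.1, hspec.2.1, hspec.2.2, ?_⟩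
  intro k hk1 hk2 hk3
  have : ¬ P k := Nat.findGreatest_is_greatest hk1 (by omega)
  exact this ⟨by omega, hk2, hk3⟩

theorem mem_keys_of_InvLast (fruits : List Int) (last : PySem.Dict Int Int) (l i : Nat)
    (hi : i ≤ fruits.length) (h : InvLast fruits last l i) (v : Int) :
    v ∈ last.keys ↔ v ∈ win fruits l i := by
  obtain ⟨-, hspec⟩ := h
  constructor
  · intro hv
    have : last.get? v ≠ none := by
      intro hc
      exact (PySem.Dict.get?_eq_none_iff_not_mem_keys last v).mp hc hv
    obtain ⟨j, hj⟩ := Option.ne_none_iff_exists'.mp this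
    obtain ⟨jn, -, hl, hlt, hget, -⟩ := (hspec v j).mp hj
    exact (win_mem_iff fruits l i hi v).mpr ⟨jn, hl, hlt, hget⟩
  · intro hv
    obtain ⟨jn, h1, h2, h3, h4⟩ := lastOcc_exists fruits l i v hi hv
    have : last.get? v = some (jn : Int) := (hspec v jn).mpr ⟨jn, rfl, h1, h2, h3, h4⟩
    by_contra hk
    rw [← PySem.Dict.get?_eq_none_iff_not_mem_keys] at hk
    rw [this] at hk
    simp at hk

theorem size_of_InvLast (fruits : List Int) (last : PySem.Dict Int Int) (l i : Nat)
    (hi : i ≤ fruits.length) (h : InvLast fruits last l i) : last.size = dc (win fruits l i) := by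
  have hperm : last.keys.Perm (PySem.Set.ofList (win fruits l i)) := by
    rw [List.perm_ext_iff_of_nodup h.1 (PySem.Set.nodup_ofList _)]
    intro v
    rw [mem_keys_of_InvLast fruits last l i hi h v, PySem.Set.mem_ofList _ v]
  have hsz : last.size = last.keys.length := by
    simp [PySem.Dict.size, PySem.Dict.keys]
  rw [hsz, hperm.length_eq]; rfl

-- my erase lemmas (none in the prelude): erase filters the items list
theorem find?_filter_ne (k x : Int) (l : List (Int × Int)) :
    ((l.filter (fun p => !(p.1 == k))).find? (fun p => p.1 == x))
      = if x = k then none else l.find? (fun p => p.1 == x) := by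
  induction l with
  | nil => simp
  | cons p rest ih =>
    by_cases hpk : p.1 = k
    · by_cases hxk : x = k
      · simp [hpk, hxk]
      · simp only [List.filter_cons, hpk, beq_self_eq_true, Bool.not_true, if_false,
          Bool.false_eq_true]
        rw [ih, if_neg hxk, List.find?_cons]
        have : (p.1 == x) = false := by simp [hpk, Ne.symm hxk] -- p.1 = k ≠ x
        simp only [this]
        rw [if_neg hxk]
    · simp only [List.filter_cons]
      have hq : (!(p.1 == k)) = true := by simp [hpk]
      rw [if_pos hq, List.find?_cons, List.find?_cons]
      by_cases hpx : p.1 = x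
      · have hxk : ¬ x = k := fun hc => hpk (hpx.trans hc)
        simp [hpx, hxk]
      · have : (p.1 == x) = false := by simp [hpx]
        simp only [this]
        exact ih

theorem get?_erase (d : PySem.Dict Int Int) (k x : Int) :
    (d.erase k).get? x = if x = k then none else d.get? x := by
  rcases d with ⟨items⟩
  simp only [PySem.Dict.erase, PySem.Dict.get?]
  rw [find?_filter_ne]
  split_ifs <;> rfl

theorem keys_erase (d : PySem.Dict Int Int) (k : Int) :
    (d.erase k).keys = d.keys.filter (fun a => !(a == k)) := by
  rcases d with ⟨items⟩
  simp only [PySem.Dict.erase, PySem.Dict.keys]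
  rw [List.filter_map]
  rfl

theorem win_snoc (fruits : List Int) (l i : Nat) (hl : l ≤ i) (hi : i < fruits.length) :
    win fruits l (i+1) = win fruits l i ++ [fruits[i]'hi] := by
  unfold win
  rw [List.take_succ_eq_append_getElem hi, List.drop_append_of_le_length (by simp; omega)]

theorem getD_eq_of_lt (fruits : List Int) (l : Nat) (hl : l < fruits.length) :
    PySem.List.pyGetD fruits (l : Int) 0 = fruits[l]'hl := by
  rw [PySem.List.pyGetD_natCast, List.getD_eq_getElem fruits 0 hl]

-- one iteration of A's shrink loop preserves the counter invariant, moving left by one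
theorem InvCnt_pop (fruits : List Int) (i L : Nat) (hi : i < fruits.length) (hL : L < i+1)
    (cnt : PySem.Dict Int Int) (hC : InvCnt fruits cnt L (i+1)) :
    InvCnt fruits
      (if (cnt.modify (fruits[L]'(by omega)) 0 (· - 1)).getD (fruits[L]'(by omega)) 0 = 0
        then (cnt.modify (fruits[L]'(by omega)) 0 (· - 1)).erase (fruits[L]'(by omega))
        else cnt.modify (fruits[L]'(by omega)) 0 (· - 1))
      (L+1) (i+1) := by
  obtain ⟨hnd, hcount, hmem⟩ := hC
  set x := fruits[L]'(by omega) with hxdef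
  have hwin : win fruits L (i+1) = x :: win fruits (L+1) (i+1) :=
    win_cons fruits L (i+1) hL (by omega)
  set t := win fruits (L+1) (i+1) with htdef
  have hxmemw : x ∈ win fruits L (i+1) := by rw [hwin]; exact List.mem_cons_self
  have hxkeys : x ∈ cnt.keys := (hmem x).mpr hxmemw
  have hcount_x : cnt.getD x 0 = ((x :: t).count x : Int) := by rw [hcount x, hwin]
  have hcx : ((x :: t).count x : Int) = (t.count x : Int) + 1 := by
    rw [List.count_cons_self]; push_cast; ring
  have hgd1 : ∀ v : Int, (cnt.modify x 0 (· - 1)).getD v 0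
      = if v = x then ((t.count x : Nat) : Int) else cnt.getD v 0 := by
    intro v
    rw [PySem.Dict.getD_modify]
    split_ifs with hv
    · rw [hcount_x, hcx]; ring
    · rfl
  have hkeys1 : ∀ v : Int, v ∈ (cnt.modify x 0 (· - 1)).keys ↔ v ∈ cnt.keys := by
    intro v
    rw [PySem.Dict.keys_modify, PySem.Dict.mem_keys_insert]
    constructor
    · rintro (rfl | hv); exact hxkeys; exact hv
    · exact Or.inr
  have hnd1 : (cnt.modify x 0 (· - 1)).keys.Nodup := by
    rw [PySem.Dict.keys_modify]
    exact PySem.Dict.nodup_keys_insert _ _ _ hnd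
  by_cases h0 : (cnt.modify x 0 (· - 1)).getD x 0 = 0
  · -- count of x dropped to 0: x does not occur in the rest of the window, key is deleted
    rw [if_pos h0]
    have hxt : x ∉ t := by
      rw [hgd1 x, if_pos rfl] at h0
      rw [← List.count_eq_zero]
      exact_mod_cast h0
    refine ⟨?_, ?_, ?_⟩
    · rw [keys_erase]; exact hnd1.filter _
    · intro v
      rw [PySem.Dict.getD_eq_get?_getD, get?_erase]
      split_ifs with hv
      · subst hv
        rw [List.count_eq_zero.mpr hxt]
        rfl
      · rw [← PySem.Dict.getD_eq_get?_getD, hgd1 v, if_neg hv, hcount v, hwin]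
        have hbeq : (x == v) = false := by
          simp only [beq_eq_false_iff_ne, ne_eq]
          exact fun h => hv h.symm
        rw [List.count_cons, hbeq]
        simp [htdef]
    · intro v
      rw [keys_erase, List.mem_filter]
      constructor
      · rintro ⟨hv1, hv2⟩
        have hvx : v ≠ x := by simpa using hv2
        have := (hmem v).mp ((hkeys1 v).mp hv1)
        rw [hwin, List.mem_cons] at this
        rcases this with h | h
        · exact absurd h hvx
        · exact h
      · intro hv
        have hvx : v ≠ x := fun hc => hxt (hc ▸ hv)
        refine ⟨(hkeys1 v).mpr ((hmem v).mpr (by rw [hwin]; exact List.mem_cons_of_mem _ hv)), ?_⟩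
        simpa using hvx
  · -- x still occurs: key stays
    rw [if_neg h0]
    have hxt : x ∈ t := by
      by_contra hnotm
      rw [hgd1 x, if_pos rfl] at h0
      exact h0 (by rw [List.count_eq_zero.mpr hnotm]; rfl)
    refine ⟨hnd1, ?_, ?_⟩
    · intro v
      rw [hgd1 v]
      split_ifs with hv
      · rw [hv]
      · rw [hcount v, hwin]
        have hbeq : (x == v) = false := by
          simp only [beq_eq_false_iff_ne, ne_eq]
          exact fun h => hv h.symm
        rw [List.count_cons, hbeq]
        simp [htdef]
    · intro v
      rw [hkeys1 v, hmem v, hwin, List.mem_cons]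
      constructor
      · rintro (rfl | h); exact hxt; exact h
      · exact fun h => Or.inr h

-- characterization of A's shrink loop
theorem popA_spec (fruits : List Int) (i : Nat) (hi : i < fruits.length) :
    ∀ (fuel : Nat) (cnt : PySem.Dict Int Int) (L : Nat), L ≤ i →
      InvCnt fruits cnt L (i+1) → i + 1 - L ≤ fuel →
      ∃ (cnt' : PySem.Dict Int Int) (L' : Nat),
        popA fruits fuel cnt (L : Int) = (cnt', (L' : Int)) ∧ L ≤ L' ∧ L' ≤ i ∧
        InvCnt fruits cnt' L' (i+1) ∧ dc (win fruits L' (i+1)) ≤ 2 ∧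
        (∀ m, L ≤ m → m < L' → 2 < dc (win fruits m (i+1))) := by
  intro fuel
  induction fuel with
  | zero => intro cnt L hL hC hf; omega
  | succ fuel ih =>
    intro cnt L hL hC hf
    have hsize : cnt.size = dc (win fruits L (i+1)) := size_of_InvCnt fruits cnt L (i+1) hC
    by_cases hgt : 2 < cnt.size
    · have hdc3 : 3 ≤ dc (win fruits L (i+1)) := by omega
      have hwl : (win fruits L (i+1)).length = i + 1 - L :=
        win_length fruits L (i+1) (by omega) (by omega)
      have hLi : L < i := by
        have := dc_le_length (win fruits L (i+1))
        omega
      have hx : PySem.List.pyGetD fruits (L : Int) 0 = fruits[L]'(by omega) :=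
        getD_eq_of_lt fruits L (by omega)
      have hstep := InvCnt_pop fruits i L hi (by omega) cnt hC
      have hrec := ih _ (L+1) (by omega) hstep (by omega)
      obtain ⟨cnt', L', hpop, h1, h2, h3, h4, h5⟩ := hrec
      refine ⟨cnt', L', ?_, by omega, h2, h3, h4, ?_⟩
      · rw [popA]
        rw [if_pos hgt]
        simp only [hx]
        rw [show (L : Int) + 1 = ((L+1 : Nat) : Int) by push_cast; ring]
        exact hpop
      · intro m hm1 hm2
        rcases Nat.eq_or_lt_of_le hm1 with rfl | hlt
        · omega
        · exact h5 m (by omega) hm2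
    · refine ⟨cnt, L, ?_, le_refl L, hL, hC, by omega, fun m h1 h2 => by omega⟩
      rw [popA, if_neg hgt]

theorem win_subset (fruits : List Int) (l m i : Nat) (hlm : l ≤ m) :
    win fruits m i ⊆ win fruits l i := by
  unfold win
  intro v hv
  rw [show m = l + (m - l) by omega, ← List.drop_drop] at hv
  exact List.drop_subset _ _ hv

theorem dc_snoc_le (w : List Int) (x : Int) : dc (w ++ [x]) ≤ dc w + 1 := by
  unfold dc
  rw [PySem.Set.ofList_append_singleton, PySem.Set.add_eq_ite]
  split_ifs
  · omega
  · simp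

-- A's counter step: count the incoming fruit
theorem InvCnt_push (fruits : List Int) (i L : Nat) (hi : i < fruits.length) (hL : L ≤ i)
    (cnt : PySem.Dict Int Int) (hC : InvCnt fruits cnt L i) :
    InvCnt fruits (cnt.modify (fruits[i]'hi) 0 (· + 1)) L (i+1) := by
  obtain ⟨hnd, hcount, hmem⟩ := hC
  set x := fruits[i]'hi with hxdef
  have hwin : win fruits L (i+1) = win fruits L i ++ [x] := win_snoc fruits L i hL hi
  refine ⟨?_, ?_, ?_⟩
  · rw [PySem.Dict.keys_modify]
    exact PySem.Dict.nodup_keys_insert _ _ _ hnd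
  · intro v
    rw [PySem.Dict.getD_modify, hwin, List.count_append]
    split_ifs with hv
    · rw [hv, hcount x]
      push_cast
      simp
    · rw [hcount v]
      have : List.count v [x] = 0 := by
        rw [List.count_eq_zero]
        simp [fun h : v = x => hv h]
      rw [this]
      simp
  · intro v
    rw [PySem.Dict.keys_modify, PySem.Dict.mem_keys_insert, hwin, List.mem_append,
      hmem v]
    simp [or_comm]

-- B's dict step: record the incoming fruit's index
theorem InvLast_push (fruits : List Int) (i L : Nat) (hi : i < fruits.length) (hL : L ≤ i)
    (last : PySem.Dict Int Int) (hLa : InvLast fruits last L i) :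
    InvLast fruits (last.insert (fruits[i]'hi) (i : Int)) L (i+1) := by
  obtain ⟨hnd, hspec⟩ := hLa
  set x := fruits[i]'hi with hxdef
  have hgetI : fruits[i]? = some x := by rw [List.getElem?_eq_getElem hi]
  refine ⟨PySem.Dict.nodup_keys_insert _ _ _ hnd, ?_⟩
  intro v j
  rw [PySem.Dict.get?_insert]
  split_ifs with hvx
  · subst hvx
    constructor
    · intro hj
      refine ⟨i, (Option.some.inj hj).symm, hL, by omega, hgetI, ?_⟩
      intro k hk1 hk2
      omega
    · rintro ⟨jn, rfl, h1, h2, h3, h4⟩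
      have : jn = i := by
        by_contra hne
        exact h4 i (by omega) (by omega) hgetI
      rw [this]
  · rw [hspec v j]
    constructor
    · rintro ⟨jn, rfl, h1, h2, h3, h4⟩
      refine ⟨jn, rfl, h1, by omega, h3, ?_⟩
      intro k hk1 hk2
      by_cases hk : k = i
      · subst hk
        rw [hgetI]
        intro hc
        exact hvx (Option.some.inj hc).symm
      · exact h4 k hk1 (by omega)
    · rintro ⟨jn, rfl, h1, h2, h3, h4⟩
      have hjni : jn ≠ i := by
        intro hc
        rw [hc, hgetI] at h3
        exact hvx (Option.some.inj h3).symm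
      exact ⟨jn, rfl, h1, by omega, h3, fun k hk1 hk2 => h4 k hk1 (by omega)⟩

-- the two step functions produce the same left/max/start and re-establish the invariants
theorem step_sim (fruits : List Int) (i : Nat) (hi : i < fruits.length)
    (cnt last : PySem.Dict Int Int) (L : Nat) (M S : Int) (hL : L ≤ i)
    (hC : InvCnt fruits cnt L i) (hLa : InvLast fruits last L i)
    (hdc : dc (win fruits L i) ≤ 2) :
    ∃ (cnt' last' : PySem.Dict Int Int) (L' : Nat) (M' S' : Int),
      stepA fruits (cnt, (L : Int), M, S) (i : Int) = (cnt', (L' : Int), M', S') ∧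
      stepB fruits (last, (L : Int), M, S) (i : Int) = (last', (L' : Int), M', S') ∧
      L' ≤ i + 1 ∧ InvCnt fruits cnt' L' (i+1) ∧ InvLast fruits last' L' (i+1) ∧
      dc (win fruits L' (i+1)) ≤ 2 := by
  have hx : PySem.List.pyGetD fruits (i : Int) 0 = fruits[i]'hi := getD_eq_of_lt fruits i hi
  set x := fruits[i]'hi with hxdef
  have hCnt1 : InvCnt fruits (cnt.modify x 0 (· + 1)) L (i+1) := InvCnt_push fruits i L hi hL cnt hC
  have hLast1 : InvLast fruits (last.insert x (i : Int)) L (i+1) := InvLast_push fruits i L hi hL last hLa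
  set cnt1 := cnt.modify x 0 (· + 1) with hcnt1def
  set last1 := last.insert x (i : Int) with hlast1def
  obtain ⟨cnt', LA, hpop, hLA1, hLA2, hCnt', hdcA, hminA⟩ :=
    popA_spec fruits i hi fruits.length cnt1 L hL hCnt1 (by omega)
  have hsizeL : last1.size = dc (win fruits L (i+1)) :=
    size_of_InvLast fruits last1 L (i+1) (by omega) hLast1
  have hdcle : dc (win fruits L (i+1)) ≤ dc (win fruits L i) + 1 := by
    rw [win_snoc fruits L i hL hi]
    exact dc_snoc_le _ _
  by_cases hbig : 2 < last1.size
  · -- three distinct fruits in the extended window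
    have h3 : dc (win fruits L (i+1)) = 3 := by omega
    have hkeylen : last1.keys.length = 3 := by
      have : last1.size = last1.keys.length := by simp [PySem.Dict.size, PySem.Dict.keys]
      omega
    have hknd : last1.keys.Nodup := hLast1.1
    rcases hminev : PySem.List.min? last1.keys (fun k => last1.getD k 0) with _ | evict
    · rw [PySem.List.min?_eq_none_iff] at hminev
      rw [hminev] at hkeylen
      simp at hkeylen
    have hevmem : evict ∈ last1.keys := PySem.List.min?_mem hminev
    have hevsome : last1.get? evict ≠ none := by
      intro hc
      exact (PySem.Dict.get?_eq_none_iff_not_mem_keys last1 evict).mp hc hevmem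
    obtain ⟨jI, hjI⟩ := Option.ne_none_iff_exists'.mp hevsome
    obtain ⟨j0, rfl, hj0L, hj0lt, hj0get, hj0last⟩ := (hLast1.2 evict jI).mp hjI
    have hgetDev : last1.getD evict 0 = (j0 : Int) := by
      rw [PySem.Dict.getD_eq_get?_getD, hjI]
      rfl
    have hmin' : ∀ v ∈ last1.keys, (j0 : Int) ≤ last1.getD v 0 := by
      intro v hv
      have := PySem.List.min?_isMin hminev v hv
      rw [hgetDev] at this
      exact this
    -- every key stores its last occurrence
    have hkeyocc : ∀ v ∈ last1.keys, ∃ jv : Nat, last1.getD v 0 = (jv : Int) ∧ L ≤ jv ∧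
        jv < i + 1 ∧ fruits[jv]? = some v ∧
        (∀ k : Nat, jv < k → k < i + 1 → fruits[k]? ≠ some v) := by
      intro v hv
      have hvsome : last1.get? v ≠ none := by
        intro hc
        exact (PySem.Dict.get?_eq_none_iff_not_mem_keys last1 v).mp hc hv
      obtain ⟨jJ, hjJ⟩ := Option.ne_none_iff_exists'.mp hvsome
      obtain ⟨jv, rfl, h1, h2, h3', h4⟩ := (hLast1.2 v jJ).mp hjJ
      exact ⟨jv, by rw [PySem.Dict.getD_eq_get?_getD, hjJ]; rfl, h1, h2, h3', h4⟩
    -- j0 < i because some key other than x has its last occurrence before i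
    have hj0i : j0 < i := by
      have hxkey : ∃ v ∈ last1.keys, v ≠ x := by
        by_contra hall
        push Not at hall
        have hcnt : last1.keys.count x = last1.keys.length := by
          rw [List.count_eq_length]
          intro b hb
          exact (hall b hb).symm
        have := List.nodup_iff_count_le_one.mp hknd x
        omega
      obtain ⟨v, hvmem, hvx⟩ := hxkey
      obtain ⟨jv, hgd, h1, h2, h3', h4⟩ := hkeyocc v hvmem
      have hjvi : jv ≠ i := by
        intro hc
        rw [hc, List.getElem?_eq_getElem hi] at h3'
        exact hvx (Option.some.inj h3').symm
      have := hmin' v hvmem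
      rw [hgd] at this
      have : j0 ≤ jv := by exact_mod_cast this
      omega
    -- the window starting just past j0 has at most two distinct values
    have hdcB : dc (win fruits (j0+1) (i+1)) ≤ 2 := by
      refine dc_le_two_of_subset _ (last1.keys.erase evict) (hknd.erase evict) ?_ ?_
      · intro v hv
        have hvwinL : v ∈ win fruits L (i+1) :=
          win_subset fruits L (j0+1) (i+1) (by omega) hv
        have hvkey : v ∈ last1.keys :=
          (mem_keys_of_InvLast fruits last1 L (i+1) (by omega) hLast1 v).mpr hvwinL
        have hvev : v ≠ evict := by
          rintro rfl
          obtain ⟨k, hk1, hk2, hk3⟩ := (win_mem_iff fruits (j0+1) (i+1) (by omega) v).mp hv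
          exact hj0last k (by omega) hk2 hk3
        exact (hknd.mem_erase_iff).mpr ⟨hvev, hvkey⟩
      · rw [List.length_erase_of_mem hevmem, hkeylen]
    -- every window reaching index j0 still holds all three values
    have hdcB2 : ∀ m, L ≤ m → m < j0 + 1 → 2 < dc (win fruits m (i+1)) := by
      intro m hm1 hm2
      have h3le : 3 ≤ dc (win fruits m (i+1)) := by
        refine three_le_dc _ last1.keys hknd (by omega) ?_
        intro v hv
        obtain ⟨jv, hgd, h1, h2, h3', h4⟩ := hkeyocc v hv
        have := hmin' v hv
        rw [hgd] at this
        have hj0jv : j0 ≤ jv := by exact_mod_cast this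
        exact (win_mem_iff fruits m (i+1) (by omega) v).mpr ⟨jv, by omega, h2, h3'⟩
      omega
    -- A's shrink loop must stop exactly at j0 + 1
    have hLAeq : LA = j0 + 1 := by
      rcases Nat.lt_trichotomy LA (j0+1) with h | h | h
      · have := hdcB2 LA hLA1 h
        omega
      · exact h
      · have := hminA (j0+1) (by omega) h
        omega
    -- B's dict after the eviction
    have hLast' : InvLast fruits (last1.erase evict) (j0+1) (i+1) := by
      refine ⟨?_, ?_⟩
      · rw [keys_erase]
        exact hknd.filter _
      · intro v j
        rw [get?_erase]
        split_ifs with hvev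
        · subst hvev
          constructor
          · intro hc
            exact absurd hc (by simp)
          · rintro ⟨jn, rfl, h1, h2, h3', h4⟩
            exact absurd h3' (hj0last jn (by omega) h2)
        · rw [hLast1.2 v j]
          constructor
          · rintro ⟨jn, rfl, h1, h2, h3', h4⟩
            have hvkey : v ∈ last1.keys := by
              by_contra hc
              rw [← PySem.Dict.get?_eq_none_iff_not_mem_keys] at hc
              rw [(hLast1.2 v ((jn : Nat) : Int)).mpr ⟨jn, rfl, h1, h2, h3', h4⟩] at hc
              simp at hc
            have hgd : last1.getD v 0 = (jn : Int) := by
              rw [PySem.Dict.getD_eq_get?_getD,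
                (hLast1.2 v ((jn : Nat) : Int)).mpr ⟨jn, rfl, h1, h2, h3', h4⟩]
              rfl
            have hj0jn : j0 ≤ jn := by
              have := hmin' v hvkey
              rw [hgd] at this
              exact_mod_cast this
            have hjnj0 : jn ≠ j0 := by
              intro hc
              rw [hc, hj0get] at h3'
              exact hvev (Option.some.inj h3').symm
            exact ⟨jn, rfl, by omega, h2, h3', h4⟩
          · rintro ⟨jn, rfl, h1, h2, h3', h4⟩
            exact ⟨jn, rfl, by omega, h2, h3', h4⟩
    refine ⟨cnt', last1.erase evict, LA,
      (if M < (i : Int) - (LA : Int) + 1 then (i : Int) - (LA : Int) + 1 else M),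
      (if M < (i : Int) - (LA : Int) + 1 then (LA : Int) else S),
      ?_, ?_, by omega, hCnt', by rw [hLAeq]; exact hLast', by rw [hLAeq]; exact hdcB⟩
    · simp only [stepA, hx]
      rw [← hcnt1def, hpop]
      split_ifs <;> rfl
    · simp only [stepB, hx]
      rw [← hlast1def]
      rw [if_pos hbig, hminev]
      simp only [hgetDev]
      rw [show (j0 : Int) + 1 = ((LA : Nat) : Int) by rw [hLAeq]; push_cast; ring]
      split_ifs <;> rfl
  · -- still at most two distinct fruits: neither side moves left
    have hLAeq : LA = L := by
      by_contra hne
      have := hminA L (le_refl L) (by omega)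
      omega
    refine ⟨cnt', last1, LA,
      (if M < (i : Int) - (LA : Int) + 1 then (i : Int) - (LA : Int) + 1 else M),
      (if M < (i : Int) - (LA : Int) + 1 then (LA : Int) else S),
      ?_, ?_, by omega, hCnt', by rw [hLAeq]; exact hLast1, by rw [hLAeq]; omega⟩
    · simp only [stepA, hx]
      rw [← hcnt1def, hpop]
      split_ifs <;> rfl
    · simp only [stepB, hx]
      rw [← hlast1def]
      rw [if_neg hbig]
      rw [show ((L : Nat) : Int) = ((LA : Nat) : Int) by rw [hLAeq]]
      split_ifs <;> rfl

theorem loop_sim (fruits : List Int) : ∀ i : Nat, i ≤ fruits.length →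
    ∃ (cnt last : PySem.Dict Int Int) (L : Nat) (M S : Int),
      (PySem.List.pyRange 0 (i : Int) 1).foldl (stepA fruits)
          ((PySem.Dict.empty, 0, 0, 0) : PySem.Dict Int Int × Int × Int × Int)
        = (cnt, (L : Int), M, S) ∧
      (PySem.List.pyRange 0 (i : Int) 1).foldl (stepB fruits)
          ((PySem.Dict.empty, 0, 0, 0) : PySem.Dict Int Int × Int × Int × Int)
        = (last, (L : Int), M, S) ∧
      L ≤ i ∧ InvCnt fruits cnt L i ∧ InvLast fruits last L i ∧
      dc (win fruits L i) ≤ 2 := by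
  intro i
  induction i with
  | zero =>
    intro _
    refine ⟨PySem.Dict.empty, PySem.Dict.empty, 0, 0, 0, ?_, ?_, le_refl 0, ?_, ?_, ?_⟩
    · rw [show ((0 : Nat) : Int) = 0 by rfl, PySem.List.pyRange_one_eq_nil (le_refl 0)]
      rfl
    · rw [show ((0 : Nat) : Int) = 0 by rfl, PySem.List.pyRange_one_eq_nil (le_refl 0)]
      rfl
    · refine ⟨by rw [PySem.Dict.keys_empty]; exact List.nodup_nil, ?_, ?_⟩
      · intro v
        rw [PySem.Dict.getD_empty]
        simp [win]
      · intro v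
        rw [PySem.Dict.keys_empty]
        simp [win]
    · refine ⟨by rw [PySem.Dict.keys_empty]; exact List.nodup_nil, ?_⟩
      intro v j
      rw [PySem.Dict.get?_empty]
      constructor
      · intro hc
        exact absurd hc (by simp)
      · rintro ⟨jn, -, -, h2, -⟩
        omega
    · simp [win, dc, PySem.Set.ofList_nil]
  | succ i ih =>
    intro hi
    obtain ⟨cnt, last, L, M, S, hA, hB, hL, hC, hLa, hdc⟩ := ih (by omega)
    obtain ⟨cnt', last', L', M', S', hsA, hsB, hL', hC', hLa', hdc'⟩ :=
      step_sim fruits i (by omega) cnt last L M S hL hC hLa hdc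
    refine ⟨cnt', last', L', M', S', ?_, ?_, hL', hC', hLa', hdc'⟩
    · rw [show ((i+1 : Nat) : Int) = (i : Int) + 1 by push_cast; ring,
        PySem.List.pyRange_one_succ_right (by positivity), List.foldl_append, hA]
      simpa using hsA
    · rw [show ((i+1 : Nat) : Int) = (i : Int) + 1 by push_cast; ring,
        PySem.List.pyRange_one_succ_right (by positivity), List.foldl_append, hB]
      simpa using hsB

-- ===== VERDICT (by name: the statement is the Claim_ definition above) =====
theorem total_fruits_spec : Claim_equal_total_fruits := by
  intro fruits _
  unfold Spec_total_fruits total_fruits total_fruits_alt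
  obtain ⟨cnt, last, L, M, S, hA, hB, -⟩ := loop_sim fruits fruits.length le_rfl
  simp only [PySem.List.len_eq, hA, hB]
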